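-- pv_equiv track=rewrite | github.com/cowpeatechnology/my-immortal-sect | tools/browser_content_filters.py | hostname_matches_suffix
-- ===== SOURCE A (Python) =====
-- from typing import Optional, Sequence
--
-- def normalize_hostname(hostname: str) -> str:
--     return (hostname or "").strip().lower().strip(".")
--
-- def hostname_matches_suffix(hostname: str, suffixes: Sequence[str]) -> bool:
--     normalized = normalize_hostname(hostname)
--     if not normalized:
--         return False
--     for suffix in suffixes:
--         normalized_suffix = normalize_hostname(suffix)
--         if normalized == normalized_suffix or normalized.endswith(f".{normalized_suffix}"):
--             return True
--     return False
-- ===== SOURCE B (Python) =====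
-- def normalize_hostname(hostname):
--     return (hostname or "").strip().lower().strip(".")
--
-- def hostname_matches_suffix(hostname, suffixes):
--     normalized = normalize_hostname(hostname)
--     if not normalized:
--         return False
--     # Precompute every dot-delimited tail of the hostname once,
--     # then each suffix is a single set-membership test.
--     candidates = {normalized}
--     tail = normalized
--     for ch in normalized:
--         tail = tail[1:]
--         if ch == '.':
--             candidates.add(tail)
--     return any(normalize_hostname(s) in candidates for s in suffixes)
-- ===== Notes on version B (the rewrite author's own statement) =====
-- stated objective: alternative
-- what changed: B precomputes the set of all dot-delimited tails of the normalized hostname in one pass and replaces A's per-suffix equality-or-endswith string scan with a single set-membership test per suffix.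
import Mathlib
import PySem

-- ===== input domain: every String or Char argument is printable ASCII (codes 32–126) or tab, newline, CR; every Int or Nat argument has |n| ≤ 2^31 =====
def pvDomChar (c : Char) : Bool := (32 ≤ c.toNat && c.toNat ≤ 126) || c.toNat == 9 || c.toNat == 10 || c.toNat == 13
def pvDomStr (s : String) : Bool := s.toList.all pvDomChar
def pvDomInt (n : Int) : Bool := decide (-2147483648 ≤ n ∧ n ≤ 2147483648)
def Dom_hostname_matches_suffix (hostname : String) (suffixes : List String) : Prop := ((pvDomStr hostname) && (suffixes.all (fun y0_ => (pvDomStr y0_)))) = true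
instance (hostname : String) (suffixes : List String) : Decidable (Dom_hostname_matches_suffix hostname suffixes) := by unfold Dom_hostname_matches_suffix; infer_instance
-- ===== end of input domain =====

-- B precomputes the set of dot-delimited tails of the hostname once, turning each
-- suffix check into a single set-membership test (different decomposition; same results).

-- normalize_hostname: (hostname or "").strip().lower().strip(".")
-- ('hostname or ""' is the identity on strings: "" is falsy and maps to "")
def pvNormalize (s : String) : List Char :=
  PySem.Chars.stripChars (PySem.Chars.lower (PySem.Chars.strip s.toList)) ['.']

-- ===== PORT A =====
-- the 'for suffix in suffixes' loop with early return True
def pvLoopA (n : List Char) : List String → Bool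
  | [] => false
  | s :: rest =>
    let ns := pvNormalize s
    if n == ns || PySem.Chars.endswith n ('.' :: ns) then true else pvLoopA n rest

def hostname_matches_suffix (hostname : String) (suffixes : List String) : Bool :=
  let normalized := pvNormalize hostname
  if normalized == [] then false else pvLoopA normalized suffixes

-- ===== PORT B =====
-- loop body: tail = tail[1:]; if ch == '.': candidates.add(tail)
def pvStepB (st : PySem.Set (List Char) × List Char) (ch : Char) :
    PySem.Set (List Char) × List Char :=
  let t := PySem.List.slice st.2 (some 1) none
  if ch == '.' then (PySem.Set.add st.1 t, t) else (st.1, t)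

def hostname_matches_suffix_alt (hostname : String) (suffixes : List String) : Bool :=
  let normalized := pvNormalize hostname
  if normalized == [] then false
  else
    let candidates :=
      (normalized.foldl pvStepB (PySem.Set.add PySem.Set.empty normalized, normalized)).1
    suffixes.any (fun s => PySem.Set.contains candidates (pvNormalize s))

-- ===== PRECONDITION & SPEC =====
def Spec_hostname_matches_suffix (hostname : String) (suffixes : List String) (out : Bool) : Prop := out = hostname_matches_suffix_alt hostname suffixes
instance (hostname : String) (suffixes : List String) (out : Bool) : Decidable (Spec_hostname_matches_suffix hostname suffixes out) := by unfold Spec_hostname_matches_suffix; infer_instance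

-- ===== CLAIM (what is proved, stated in full; the proofs are below) =====
def Claim_equal_hostname_matches_suffix : Prop := ∀ (hostname : String) (suffixes : List String), Dom_hostname_matches_suffix hostname suffixes → Spec_hostname_matches_suffix hostname suffixes (hostname_matches_suffix hostname suffixes)

-- ===== LEMMAS AND PROOFS =====

-- the tail-tracking fold collects exactly the tails that follow a '.'
lemma foldB_mem (rest : List Char) (cands : PySem.Set (List Char)) (x : List Char) :
    x ∈ (rest.foldl pvStepB (cands, rest)).1 ↔
      x ∈ cands ∨ ∃ i, rest[i]? = some '.' ∧ rest.drop (i + 1) = x := by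
  induction rest generalizing cands with
  | nil => simp
  | cons c r ih =>
    have hstep : pvStepB (cands, c :: r) c =
        (if c == '.' then PySem.Set.add cands r else cands, r) := by
      simp only [pvStepB, pysem]
      split <;> rfl
    rw [List.foldl_cons, hstep]
    by_cases hc : c = '.'
    · simp only [hc, beq_self_eq_true, if_true, ih]
      rw [PySem.Set.mem_add]
      constructor
      · rintro ((h | h) | ⟨i, hi, hd⟩)
        · exact Or.inl h
        · exact Or.inr ⟨0, by simp, by simpa using h.symm⟩
        · exact Or.inr ⟨i + 1, by simpa using hi, by simpa using hd⟩
      · rintro (h | ⟨i, hi, hd⟩)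
        · exact Or.inl (Or.inl h)
        · cases i with
          | zero => exact Or.inl (Or.inr (by simpa using hd.symm))
          | succ j => exact Or.inr ⟨j, by simpa using hi, by simpa using hd⟩
    · simp only [beq_iff_eq, hc, if_false, ih]
      constructor
      · rintro (h | ⟨i, hi, hd⟩)
        · exact Or.inl h
        · exact Or.inr ⟨i + 1, by simpa using hi, by simpa using hd⟩
      · rintro (h | ⟨i, hi, hd⟩)
        · exact Or.inl h
        · cases i with
          | zero => exact absurd (by simpa using hi) hc
          | succ j => exact Or.inr ⟨j, by simpa using hi, by simpa using hd⟩

-- '.'-prefixed suffix of n ↔ some dot-delimited tail of n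
lemma dot_suffix_iff (n ns : List Char) :
    ('.' :: ns) <:+ n ↔ ∃ i, n[i]? = some '.' ∧ n.drop (i + 1) = ns := by
  induction n with
  | nil => simp
  | cons c r ih =>
    rw [List.suffix_cons_iff]
    constructor
    · rintro (h | h)
      · obtain ⟨h1, h2⟩ := List.cons.inj h
        exact ⟨0, by simp [h1.symm], by simpa using h2.symm⟩
      · obtain ⟨i, hi, hd⟩ := ih.mp h
        exact ⟨i + 1, by simpa using hi, by simpa using hd⟩
    · rintro ⟨i, hi, hd⟩
      cases i with
      | zero =>
        left
        simp only [List.getElem?_cons_zero, Option.some.injEq] at hi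
        simp only [List.drop_succ_cons, List.drop_zero] at hd
        rw [hi, hd]
      | succ j => exact Or.inr (ih.mpr ⟨j, by simpa using hi, by simpa using hd⟩)

-- per-suffix agreement: A's equality-or-endswith test = B's membership test
lemma test_eq (n ns : List Char) :
    (n == ns || PySem.Chars.endswith n ('.' :: ns)) =
      PySem.Set.contains ((n.foldl pvStepB (PySem.Set.add PySem.Set.empty n, n)).1) ns := by
  have hmem : ns ∈ (n.foldl pvStepB (PySem.Set.add PySem.Set.empty n, n)).1 ↔
      n = ns ∨ ('.' :: ns) <:+ n := by
    rw [foldB_mem, dot_suffix_iff, PySem.Set.mem_add]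
    simp [PySem.Set.empty, eq_comm]
  have hc : PySem.Set.contains ((n.foldl pvStepB (PySem.Set.add PySem.Set.empty n, n)).1) ns
      = true ↔ ns ∈ (n.foldl pvStepB (PySem.Set.add PySem.Set.empty n, n)).1 := by
    simp [pysem]
  rw [Bool.eq_iff_iff, Bool.or_eq_true, beq_iff_eq, PySem.Chars.endswith_iff, hc, hmem]

lemma loopA_eq_any (n : List Char) (suffixes : List String) :
    pvLoopA n suffixes =
      suffixes.any (fun s =>
        PySem.Set.contains ((n.foldl pvStepB (PySem.Set.add PySem.Set.empty n, n)).1)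
          (pvNormalize s)) := by
  induction suffixes with
  | nil => simp [pvLoopA]
  | cons s rest ih =>
    simp only [pvLoopA, List.any_cons, ← ih, test_eq]
    split_ifs with h
    · simp [pysem] at h
      simp [h]
    · simp only [Bool.not_eq_true] at h
      simp [pysem] at h
      simp [h]

-- ===== VERDICT (by name: the statement is the Claim_ definition above) =====
theorem hostname_matches_suffix_spec : Claim_equal_hostname_matches_suffix := by
  intro hostname suffixes _
  unfold Spec_hostname_matches_suffix hostname_matches_suffix hostname_matches_suffix_alt
  by_cases h : pvNormalize hostname == []
  · simp [h]
  · simp only [h]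
    exact loopA_eq_any _ _
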